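-- pv_equiv track=rewrite | github.com/dfang314/Game-Solvers | comp_finder.py | score_team
-- ===== SOURCE A (Python) =====
-- traits = {"clan",
--           "brawler",
--           "noble",
--           "blaster",
--           "electric",
--           "wizard",
--           "juggernaut",
--           "ace",
--           "avenger",
--           "goblin",
--           "ghost",
--           "assassin",
--           "archer",
--           "fire"}
--
-- def score_team(team, cost, traits):
--   ret = 0
--   for trait in traits:
--     if traits[trait] >= 6:
--       ret += 5
--     elif traits[trait] >= 4:
--       ret += 3
--     elif traits[trait] >= 2:
--       ret += 1
--   return ret
-- ===== SOURCE B (Python) =====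
-- def score_team(team, cost, traits):
--   ret = 0
--   for threshold, inc in [(2, 1), (4, 2), (6, 2)]:
--     for count in traits.values():
--       if count >= threshold:
--         ret += inc
--   return ret
-- ===== Notes on version B (the rewrite author's own statement) =====
-- stated objective: alternative
-- what changed: Replaces the per-trait elif cascade with an outer loop over cumulative (threshold, increment) pairs [(2,1),(4,2),(6,2)] that scans the trait counts once per threshold, accumulating increments across passes.
import Mathlib
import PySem

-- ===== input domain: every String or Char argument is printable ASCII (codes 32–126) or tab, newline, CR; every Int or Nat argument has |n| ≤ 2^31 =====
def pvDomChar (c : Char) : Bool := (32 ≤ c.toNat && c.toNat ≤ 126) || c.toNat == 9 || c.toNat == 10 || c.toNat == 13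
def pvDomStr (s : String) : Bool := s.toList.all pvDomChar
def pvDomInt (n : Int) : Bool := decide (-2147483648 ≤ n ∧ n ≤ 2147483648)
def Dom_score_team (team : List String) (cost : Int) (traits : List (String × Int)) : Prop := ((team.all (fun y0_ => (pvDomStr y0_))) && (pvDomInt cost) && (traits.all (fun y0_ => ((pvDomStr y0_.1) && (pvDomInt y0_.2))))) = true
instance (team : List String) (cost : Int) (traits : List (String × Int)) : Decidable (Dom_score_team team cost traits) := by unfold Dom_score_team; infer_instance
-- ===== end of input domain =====

-- B replaces A's per-trait elif ladder by an outer loop over cumulative (threshold, increment)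
-- pairs with an inner scan of the trait counts (objective: alternative decomposition, same cost).

-- ===== PORT A =====
-- 'for trait in traits: … traits[trait] …' visits each dict entry once and reads its value;
-- ported as a fold over the entries using the stored value (exact: dict keys are distinct).
def score_team (team : List String) (cost : Int) (traits : List (String × Int)) : Int :=
  traits.foldl (fun ret kv =>
    if kv.2 ≥ 6 then ret + 5
    else if kv.2 ≥ 4 then ret + 3
    else if kv.2 ≥ 2 then ret + 1
    else ret) 0

-- ===== PORT B =====
-- outer loop over the literal (threshold, inc) list; inner loop over traits.values()
def score_team_alt (team : List String) (cost : Int) (traits : List (String × Int)) : Int :=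
  [((2 : Int), (1 : Int)), (4, 2), (6, 2)].foldl (fun ret ti =>
    traits.foldl (fun r kv => if kv.2 ≥ ti.1 then r + ti.2 else r) ret) 0

-- ===== PRECONDITION & SPEC =====
def Spec_score_team (team : List String) (cost : Int) (traits : List (String × Int)) (out : Int) : Prop := out = score_team_alt team cost traits
instance (team : List String) (cost : Int) (traits : List (String × Int)) (out : Int) : Decidable (Spec_score_team team cost traits out) := by unfold Spec_score_team; infer_instance

-- ===== CLAIM (what is proved, stated in full; the proofs are below) =====
def Claim_equal_score_team : Prop := ∀ (team : List String) (cost : Int) (traits : List (String × Int)), Dom_score_team team cost traits → Spec_score_team team cost traits (score_team team cost traits)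

-- ===== LEMMAS AND PROOFS =====

-- A's per-trait bonus
def pvBonus (v : Int) : Int := if v ≥ 6 then 5 else if v ≥ 4 then 3 else if v ≥ 2 then 1 else 0

-- indicator contribution of one threshold pass
def pvInd (t inc v : Int) : Int := if v ≥ t then inc else 0

lemma pvA_sum (l : List (String × Int)) (a : Int) :
    l.foldl (fun ret kv =>
      if kv.2 ≥ 6 then ret + 5
      else if kv.2 ≥ 4 then ret + 3
      else if kv.2 ≥ 2 then ret + 1
      else ret) a = a + (l.map (fun kv => pvBonus kv.2)).sum := by
  induction l generalizing a with
  | nil => simp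
  | cons h t ih =>
      rw [List.foldl_cons, ih, List.map_cons, List.sum_cons]
      simp only [pvBonus]
      split_ifs <;> ring

lemma pvB_sum (t inc : Int) (l : List (String × Int)) (a : Int) :
    l.foldl (fun r kv => if kv.2 ≥ t then r + inc else r) a
      = a + (l.map (fun kv => pvInd t inc kv.2)).sum := by
  induction l generalizing a with
  | nil => simp
  | cons h tl ih =>
      rw [List.foldl_cons, ih, List.map_cons, List.sum_cons]
      simp only [pvInd]
      split_ifs <;> ring

lemma pvBonus_split (v : Int) : pvBonus v = pvInd 2 1 v + pvInd 4 2 v + pvInd 6 2 v := by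
  simp only [pvBonus, pvInd]; split_ifs <;> omega

lemma pvSum_split (l : List (String × Int)) :
    (l.map (fun kv => pvBonus kv.2)).sum
      = (l.map (fun kv => pvInd 2 1 kv.2)).sum + (l.map (fun kv => pvInd 4 2 kv.2)).sum
        + (l.map (fun kv => pvInd 6 2 kv.2)).sum := by
  induction l with
  | nil => simp
  | cons h t ih =>
      rw [List.map_cons, List.map_cons, List.map_cons, List.map_cons, List.sum_cons,
        List.sum_cons, List.sum_cons, List.sum_cons, ih, pvBonus_split]
      ring

-- ===== VERDICT (by name: the statement is the Claim_ definition above) =====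
theorem score_team_spec : Claim_equal_score_team := by
  intro team cost traits _
  show score_team team cost traits = score_team_alt team cost traits
  simp only [score_team, score_team_alt, List.foldl, pvA_sum, pvB_sum, pvSum_split]
  ring
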